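-- pv_equiv track=rewrite | github.com/devyzz/yeardream-python | _복습/[힙]점토놀이.py | getMinForce
-- ===== SOURCE A (Python) =====
-- import heapq
--
-- def getMinForce(weights):
--     heapq.heapify(weights) #최소힙
--
--     result = 0
--
--     while len(weights) > 1:
--         x = heapq.heappop(weights)
--         y = heapq.heappop(weights)
--
--         tmp = x+y
--         result += tmp
--
--         heapq.heappush(weights, tmp) # 덩이의 무게를 다시 넣는 과정이 필요하기 때문에 heapq를 쓰는듯
--
--     return result
-- ===== SOURCE B (Python) =====
-- def getMinForce(weights):
--     ws = sorted(weights)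
--     result = 0
--     while len(ws) > 1:
--         s = ws[0] + ws[1]
--         rest = ws[2:]
--         i = 0
--         while i < len(rest) and rest[i] <= s:
--             i += 1
--         rest.insert(i, s)
--         ws = rest
--         result += s
--     return result
-- ===== Notes on version B (the rewrite author's own statement) =====
-- stated objective: alternative
-- what changed: Replaces the heap (heapify + heappop/heappush each round) with one upfront sort and a linear ordered-insert of each merge sum into the sorted worklist; equivalence concerns the return value only (A mutates its argument, B does not).
import Mathlib
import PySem

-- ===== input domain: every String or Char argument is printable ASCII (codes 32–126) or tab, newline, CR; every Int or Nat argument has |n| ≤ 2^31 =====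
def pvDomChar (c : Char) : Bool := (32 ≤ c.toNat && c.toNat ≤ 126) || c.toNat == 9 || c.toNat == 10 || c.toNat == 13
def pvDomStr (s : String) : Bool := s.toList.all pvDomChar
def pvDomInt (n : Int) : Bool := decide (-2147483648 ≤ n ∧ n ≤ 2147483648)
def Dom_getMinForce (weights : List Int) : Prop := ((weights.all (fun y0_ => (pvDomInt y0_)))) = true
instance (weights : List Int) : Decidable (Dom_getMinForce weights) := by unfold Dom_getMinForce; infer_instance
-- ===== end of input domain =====

-- B replaces A's heap with a single sort plus linear ordered-insert of each merge sum;
-- equivalence is about the RETURN value only (Python A mutates its argument, B does not).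


-- ===== PORT A =====
-- heapq.heappop is ported as extract-min (PySem.List.min? + remove?); heappush appends the
-- merged weight; the loop carries fuel = initial length (each iteration shrinks the list by 1).
def getMinForceLoop : Nat → List Int → Int → Int
  | 0, _, result => result
  | fuel + 1, ws, result =>
    if ws.length > 1 then
      match PySem.List.min? ws (fun v => v) with
      | none => result
      | some x =>
        let ws1 := (PySem.List.remove? ws x).getD []
        match PySem.List.min? ws1 (fun v => v) with
        | none => result
        | some y =>
          let ws2 := (PySem.List.remove? ws1 y).getD []
          let tmp := x + y
          getMinForceLoop fuel (ws2 ++ [tmp]) (result + tmp)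
    else result

def getMinForce (weights : List Int) : Int :=
  getMinForceLoop weights.length weights 0

-- ===== PORT B =====
-- insert s after every element ≤ s (B's inner while-loop + insert)
def insSorted (s : Int) : List Int → List Int
  | [] => [s]
  | b :: l => if b ≤ s then b :: insSorted s l else s :: b :: l

def getMinForceAltLoop : Nat → List Int → Int → Int
  | 0, _, result => result
  | fuel + 1, ws, result =>
    match ws with
    | x :: y :: rest =>
      let s := x + y
      getMinForceAltLoop fuel (insSorted s rest) (result + s)
    | _ => result

def getMinForce_alt (weights : List Int) : Int :=
  let ws := PySem.List.sorted weights (fun v => v)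
  getMinForceAltLoop ws.length ws 0

-- ===== PRECONDITION & SPEC =====
def Spec_getMinForce (weights : List Int) (out : Int) : Prop := out = getMinForce_alt weights
instance (weights : List Int) (out : Int) : Decidable (Spec_getMinForce weights out) := by unfold Spec_getMinForce; infer_instance

-- ===== CLAIM (what is proved, stated in full; the proofs are below) =====
def Claim_equal_getMinForce : Prop := ∀ (weights : List Int), Dom_getMinForce weights → Spec_getMinForce weights (getMinForce weights)

-- ===== LEMMAS AND PROOFS =====

theorem insSorted_perm (s : Int) (l : List Int) : (insSorted s l).Perm (s :: l) := by
  induction l with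
  | nil => simp [insSorted]
  | cons b t ih =>
    simp only [insSorted]
    split
    · exact ((ih.cons b).trans (List.Perm.swap s b t))
    · exact List.Perm.refl _

theorem insSorted_pairwise (s : Int) (l : List Int)
    (h : l.Pairwise (· ≤ ·)) : (insSorted s l).Pairwise (· ≤ ·) := by
  induction l with
  | nil => simp [insSorted]
  | cons b t ih =>
    rcases List.pairwise_cons.mp h with ⟨hb, ht⟩
    simp only [insSorted]
    split
    · rename_i hbs
      refine List.pairwise_cons.mpr ⟨?_, ih ht⟩
      intro z hz
      rcases List.mem_cons.mp ((insSorted_perm s t).mem_iff.mp hz) with rfl | hz'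
      · omega
      · exact hb z hz'
    · rename_i hbs
      refine List.pairwise_cons.mpr ⟨?_, h⟩
      intro z hz
      rcases List.mem_cons.mp hz with rfl | hz'
      · omega
      · have := hb z hz'; omega

theorem min?_of_sorted_perm (ws : List Int) (x : Int) (t : List Int)
    (hperm : (x :: t).Perm ws) (hpw : (x :: t).Pairwise (· ≤ ·)) :
    PySem.List.min? ws (fun v => v) = some x := by
  have hne : ws ≠ [] := by
    intro h; subst h; exact (List.cons_ne_nil x t) hperm.eq_nil
  rcases hm : PySem.List.min? ws (fun v => v) with _ | m
  · exact absurd (Iff.mp (PySem.List.min?_eq_none_iff ws (fun v => v)) hm) hne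
  · have hmem : m ∈ ws := PySem.List.min?_mem hm
    have hmin : ∀ z ∈ ws, m ≤ z := by
      intro z hz
      exact PySem.List.min?_isMin hm z hz
    have hxmem : x ∈ ws := hperm.mem_iff.mp (List.mem_cons_self ..)
    have hxle : ∀ z ∈ ws, x ≤ z := by
      intro z hz
      rcases List.mem_cons.mp (hperm.mem_iff.mpr hz) with rfl | h'
      · omega
      · exact (List.pairwise_cons.mp hpw).1 z h'

    have h1 := hmin x hxmem
    have h2 := hxle m hmem
    have : m = x := by omega
    rw [this]

theorem loop_eq (fuel : Nat) : ∀ (ws l' : List Int) (res : Int),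
    l'.Perm ws → l'.Pairwise (· ≤ ·) →
    getMinForceLoop fuel ws res = getMinForceAltLoop fuel l' res := by
  induction fuel with
  | zero => intro ws l' res _ _; rfl
  | succ f ih =>
    intro ws l' res hperm hpw
    rcases l' with _ | ⟨x, t⟩
    · have : ws.length = 0 := by simpa using hperm.length_eq.symm
      simp [getMinForceLoop, getMinForceAltLoop, this]
    rcases t with _ | ⟨y, rest⟩
    · have : ws.length = 1 := by simpa using hperm.length_eq.symm
      simp [getMinForceLoop, getMinForceAltLoop, this]
    · have hlen2 : ws.length > 1 := by
        have := hperm.length_eq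
        simp only [List.length_cons] at this
        omega
      have hx : PySem.List.min? ws (fun v => v) = some x :=
        min?_of_sorted_perm ws x (y :: rest) hperm hpw
      have hxmem : x ∈ ws := hperm.mem_iff.mp (List.mem_cons_self ..)
      have hrem1 : PySem.List.remove? ws x = some (ws.erase x) :=
        PySem.List.remove?_eq_some_erase ws x hxmem
      have hperm1 : (y :: rest).Perm (ws.erase x) := by
        have := hperm.erase x
        simpa using this
      have hpw1 : (y :: rest).Pairwise (· ≤ ·) := (List.pairwise_cons.mp hpw).2
      have hy : PySem.List.min? (ws.erase x) (fun v => v) = some y :=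
        min?_of_sorted_perm (ws.erase x) y rest hperm1 hpw1
      have hymem : y ∈ ws.erase x := hperm1.mem_iff.mp (List.mem_cons_self ..)
      have hrem2 : PySem.List.remove? (ws.erase x) y = some ((ws.erase x).erase y) :=
        PySem.List.remove?_eq_some_erase (ws.erase x) y hymem
      have hperm2 : rest.Perm ((ws.erase x).erase y) := by
        have := hperm1.erase y
        simpa using this
      simp only [getMinForceLoop, getMinForceAltLoop, hlen2, if_pos, hx, hrem1,
        Option.getD_some, hy, hrem2]
      apply ih
      · exact ((insSorted_perm (x + y) rest).trans
          (((List.perm_append_singleton (x + y) rest).symm.trans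
            ((hperm2.append_right [x + y])))
          )).symm.symm
      · exact insSorted_pairwise _ _ (List.pairwise_cons.mp hpw1).2

-- ===== VERDICT (by name: the statement is the Claim_ definition above) =====
theorem getMinForce_spec : Claim_equal_getMinForce := by
  intro weights _
  unfold Spec_getMinForce getMinForce getMinForce_alt
  have hperm : (PySem.List.sorted weights (fun v => v)).Perm weights :=
    PySem.List.sorted_perm ..
  have hlen : (PySem.List.sorted weights (fun v => v)).length = weights.length :=
    hperm.length_eq
  show getMinForceLoop weights.length weights 0 =
    getMinForceAltLoop (PySem.List.sorted weights (fun v => v)).length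
      (PySem.List.sorted weights (fun v => v)) 0
  rw [hlen]
  exact loop_eq weights.length weights _ 0 hperm
    (by simpa using PySem.List.sorted_pairwise weights (fun v => v))
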